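-- pv_equiv track=rewrite | github.com/queenJiJi/Algorithm_Study | 알고리즘/DFS-BFS/*괄호변환.py | parse
-- ===== SOURCE A (Python) =====
-- def parse(w):  # 올바른 문자열까지인지 아닌지와 아닌 곳부터의 위치 반환 함수
--     left, right = 0, 0  # '('의 갯수 left, ')'의 갯수 right
--     flag = True
--     stack = []
--     for i in range(len(w)):
--         if w[i] == '(':
--             left += 1
--             stack.append(w[i])
--         else:
--             right += 1
--             if len(stack) == 0:
--                 flag = False
--             else:
--                 stack.pop()
--         if left == right:
--             return flag, i+1
--     return False, 0
-- ===== SOURCE B (Python) =====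
-- def parse(w):
--     # pass 1: locate the split index s = first i+1 where counts of '(' and non-'(' are equal
--     opens, closes = 0, 0
--     s = 0
--     for i in range(len(w)):
--         if w[i] == '(':
--             opens += 1
--         else:
--             closes += 1
--         if opens == closes:
--             s = i + 1
--             break
--     else:
--         return False, 0
--     # pass 2: validate the prefix w[:s] with an integer balance
--     bal = 0
--     ok = True
--     for ch in w[:s]:
--         bal += 1 if ch == '(' else -1
--         if bal < 0:
--             ok = False
--     return ok, s
-- ===== Notes on version B (the rewrite author's own statement) =====
-- stated objective: simpler
-- what changed: A's single interleaved loop tracking two counters, a stack and a flag is replaced by two separate passes: first locate the split index as the first position where the counts of opening and non-opening characters coincide (falling back to the no-split result otherwise), then validate the prefix with a running integer balance that marks failure once it drops below zero.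
import Mathlib
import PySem

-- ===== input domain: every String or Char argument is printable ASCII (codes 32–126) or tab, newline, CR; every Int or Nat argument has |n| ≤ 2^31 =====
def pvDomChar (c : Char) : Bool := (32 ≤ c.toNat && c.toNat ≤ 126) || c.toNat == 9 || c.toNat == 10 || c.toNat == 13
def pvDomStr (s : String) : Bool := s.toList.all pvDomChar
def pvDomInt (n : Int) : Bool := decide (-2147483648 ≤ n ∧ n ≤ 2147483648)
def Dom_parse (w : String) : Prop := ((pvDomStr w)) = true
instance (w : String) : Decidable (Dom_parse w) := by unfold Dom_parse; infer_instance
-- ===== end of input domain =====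

-- B replaces A's interleaved stack-tracking loop by two separate passes (locate the split
-- index first, then validate the prefix with an integer balance); objective: simpler.

-- ===== PORT A =====
-- A's single loop: counters left/right, a stack of opening chars, flag cleared on pop-from-empty.
def parseLoopA : List Char → Int → Int → Bool → List Char → Int → Bool × Int
  | [], _, _, _, _, _ => (false, 0)
  | ch :: rest, left, right, flag, stack, i =>
    if ch = '(' then
      let left' := left + 1
      let stack' := ch :: stack
      if left' = right then (flag, i + 1) else parseLoopA rest left' right flag stack' (i + 1)
    else
      let right' := right + 1
      match stack with
      | [] =>
        if left = right' then (false, i + 1) else parseLoopA rest left right' false [] (i + 1)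
      | _ :: stail =>
        if left = right' then (flag, i + 1) else parseLoopA rest left right' flag stail (i + 1)

def parse (w : String) : Bool × Int := parseLoopA w.toList 0 0 true [] 0

-- ===== PORT B =====
-- pass 1: first position i+1 where the counts of opening and non-opening chars coincide (none = no split)
def findSplit : List Char → Int → Int → Int → Option Int
  | [], _, _, _ => none
  | ch :: rest, opens, closes, i =>
    let opens' := if ch = '(' then opens + 1 else opens
    let closes' := if ch = '(' then closes else closes + 1
    if opens' = closes' then some (i + 1) else findSplit rest opens' closes' (i + 1)

-- pass 2: integer balance over the prefix, cleared once it drops below zero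
def checkPrefix : List Char → Int → Bool → Bool
  | [], _, ok => ok
  | ch :: rest, bal, ok =>
    let bal' := bal + (if ch = '(' then 1 else -1)
    checkPrefix rest bal' (if bal' < 0 then false else ok)

def parse_alt (w : String) : Bool × Int :=
  match findSplit w.toList 0 0 0 with
  | none => (false, 0)
  | some s => (checkPrefix (PySem.List.slice w.toList none (some s)) 0 true, s)

-- ===== PRECONDITION & SPEC =====
def Spec_parse (w : String) (out : Bool × Int) : Prop := out = parse_alt w
instance (w : String) (out : Bool × Int) : Decidable (Spec_parse w out) := by unfold Spec_parse; infer_instance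

-- ===== CLAIM (what is proved, stated in full; the proofs are below) =====
def Claim_equal_parse : Prop := ∀ (w : String), Dom_parse w → Spec_parse w (parse w)

-- ===== LEMMAS AND PROOFS =====

-- reference loop: A's loop with the stack replaced by the balance left-right
def refLoop : List Char → Int → Bool → Int → Bool × Int
  | [], _, _, _ => (false, 0)
  | ch :: rest, bal, ok, i =>
    let bal' := bal + (if ch = '(' then 1 else -1)
    let ok' := if bal' < 0 then false else ok
    if bal' = 0 then (ok', i + 1) else refLoop rest bal' ok' (i + 1)

lemma parseLoopA_eq_ref (cs : List Char) : ∀ (left right : Int) (flag : Bool)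
    (stack : List Char) (i : Int),
    (flag = true → (stack.length : Int) = left - right) →
    parseLoopA cs left right flag stack i = refLoop cs (left - right) flag i := by
  induction cs with
  | nil => intro left right flag stack i h; rfl
  | cons ch rest ih =>
    intro left right flag stack i h
    by_cases hc : ch = '('
    · subst hc
      simp only [parseLoopA, refLoop, reduceIte]
      rw [show left - right + (1 : Int) = (left + 1) - right from by ring]
      have hok : (if (left + 1) - right < 0 then false else flag) = flag := by
        cases flag with
        | false => split <;> rfl
        | true => have hs := h rfl; rw [if_neg (by omega)]
      rw [hok]
      by_cases he : left + 1 = right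
      · rw [if_pos he, if_pos (show (left + 1) - right = (0 : Int) from by omega)]
      · rw [if_neg he, if_neg (show ¬ (left + 1) - right = (0 : Int) from by omega)]
        exact ih (left + 1) right flag ('(' :: stack) (i + 1) (by
          intro hf; have hs := h hf; simp only [List.length_cons]; push_cast; omega)
    · cases stack with
      | nil =>
        simp only [parseLoopA, refLoop, hc, reduceIte]
        by_cases he : left = right + 1
        · rw [if_pos he, if_pos (show left - right + (-1 : Int) = 0 from by omega)]
          cases flag with
          | false => rw [if_neg (by omega)]
          | true => have hs := h rfl; simp only [List.length_nil] at hs; omega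
        · rw [if_neg he, if_neg (show ¬ left - right + (-1 : Int) = 0 from by omega)]
          have hok : (if left - right + (-1 : Int) < 0 then false else flag) = false := by
            cases flag with
            | false => split <;> rfl
            | true => have hs := h rfl; simp only [List.length_nil] at hs
                      rw [if_pos (by omega)]
          rw [hok, show left - right + (-1 : Int) = left - (right + 1) from by ring]
          exact ih left (right + 1) false [] (i + 1) (by intro hf; cases hf)
      | cons top stail =>
        simp only [parseLoopA, refLoop, hc, reduceIte]
        have hok : (if left - right + (-1 : Int) < 0 then false else flag) = flag := by
          cases flag with
          | false => split <;> rfl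
          | true => have hs := h rfl; simp only [List.length_cons] at hs
                    rw [if_neg (by push_cast at hs ⊢; omega)]
        rw [hok]
        by_cases he : left = right + 1
        · rw [if_pos he, if_pos (show left - right + (-1 : Int) = 0 from by omega)]
        · rw [if_neg he, if_neg (show ¬ left - right + (-1 : Int) = 0 from by omega)]
          rw [show left - right + (-1 : Int) = left - (right + 1) from by ring]
          exact ih left (right + 1) flag stail (i + 1) (by
            intro hf; have hs := h hf; simp only [List.length_cons] at hs; push_cast at hs ⊢; omega)

lemma findSplit_gt (cs : List Char) : ∀ (o c i s : Int),
    findSplit cs o c i = some s → i < s := by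
  induction cs with
  | nil => intro o c i s h; cases h
  | cons ch rest ih =>
    intro o c i s h
    by_cases hc : ch = '(' <;> simp only [findSplit, hc, reduceIte] at h <;> split at h
    · cases h; omega
    · have := ih _ _ _ _ h; omega
    · cases h; omega
    · have := ih _ _ _ _ h; omega

lemma ref_eq_B (cs : List Char) : ∀ (o c : Int) (ok : Bool) (i : Int),
    refLoop cs (o - c) ok i =
      match findSplit cs o c i with
      | none => (false, 0)
      | some s => (checkPrefix (cs.take (s - i).toNat) (o - c) ok, s) := by
  induction cs with
  | nil => intro o c ok i; rfl
  | cons ch rest ih =>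
    intro o c ok i
    by_cases hc : ch = '('
    · simp only [refLoop, findSplit, hc, reduceIte]
      rw [show o - c + (1 : Int) = (o + 1) - c from by ring]
      by_cases h0 : o + 1 = c
      · rw [if_pos h0, if_pos (show (o + 1) - c = (0 : Int) from by omega)]
        have ht : ((i + 1 - i : Int)).toNat = 1 := by omega
        simp only [ht, List.take_succ_cons, List.take_zero, checkPrefix, reduceIte]
        rw [show o - c + (1 : Int) = (o + 1) - c from by ring]
      · rw [if_neg h0, if_neg (show ¬ (o + 1) - c = (0 : Int) from by omega)]
        rw [ih (o + 1) c _ (i + 1)]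
        cases hfs : findSplit rest (o + 1) c (i + 1) with
        | none => rfl
        | some s =>
          have hgt := findSplit_gt rest _ _ _ _ hfs
          have htk : ((s - i : Int)).toNat = ((s - (i + 1) : Int)).toNat + 1 := by omega
          simp only [htk, List.take_succ_cons, checkPrefix, reduceIte]
          rw [show o - c + (1 : Int) = (o + 1) - c from by ring]
    · simp only [refLoop, findSplit, hc, reduceIte]
      rw [show o - c + (-1 : Int) = o - (c + 1) from by ring]
      by_cases h0 : o = c + 1
      · rw [if_pos h0, if_pos (show o - (c + 1) = (0 : Int) from by omega)]
        have ht : ((i + 1 - i : Int)).toNat = 1 := by omega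
        simp only [ht, List.take_succ_cons, List.take_zero, checkPrefix, hc, reduceIte]
        rw [show o - c + (-1 : Int) = o - (c + 1) from by ring]
      · rw [if_neg h0, if_neg (show ¬ o - (c + 1) = (0 : Int) from by omega)]
        rw [ih o (c + 1) _ (i + 1)]
        cases hfs : findSplit rest o (c + 1) (i + 1) with
        | none => rfl
        | some s =>
          have hgt := findSplit_gt rest _ _ _ _ hfs
          have htk : ((s - i : Int)).toNat = ((s - (i + 1) : Int)).toNat + 1 := by omega
          simp only [htk, List.take_succ_cons, checkPrefix, hc, reduceIte]
          rw [show o - c + (-1 : Int) = o - (c + 1) from by ring]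

lemma slice_to_of_nonneg (cs : List Char) (s : Int) (hs : 0 ≤ s) :
    PySem.List.slice cs none (some s) = cs.take s.toNat := by
  have hcast : s = ((s.toNat : Nat) : Int) := by omega
  rw [hcast, PySem.List.slice_to_natCast]
  congr 1

-- ===== VERDICT (by name: the statement is the Claim_ definition above) =====
theorem parse_spec : Claim_equal_parse := by
  intro w _
  unfold Spec_parse parse parse_alt
  rw [parseLoopA_eq_ref w.toList 0 0 true [] 0 (by intro _; simp)]
  have h := ref_eq_B w.toList 0 0 true 0
  simp only [sub_zero] at h ⊢
  rw [h]
  cases hfs : findSplit w.toList 0 0 0 with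
  | none => rfl
  | some s =>
    have hgt := findSplit_gt w.toList _ _ _ _ hfs
    simp only [slice_to_of_nonneg w.toList s (by omega)]
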